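-- pv_equiv track=rewrite | github.com/stefaniexyy/minitool | oracle_tool/compare_oracle/compare_oracle.py | generate_compare_array
-- ===== SOURCE A (Python) =====
-- def generate_compare_array(arr1,arr2):
--     min_len=len(arr1) if len(arr1)<=len(arr2) else len(arr2)
--     arr=[]
--     for i in arr1:
--         flag=0
--         for j in arr2:
--             if i[0]==j[0] and i[1]!=j[1]:
--                 flag=1
--                 arr.append([i,j])
--                 break
--             elif i[0]==j[0] and i[1]==j[1]:
--                 flag=2
--                 break
--         if flag==0:
--              arr.append([i,""])
--     for i in arr2:
--         flag=0
--         for j in arr1: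
--             if i[0]==j[0]:
--                 flag=2
--                 break
--         if flag==0:
--             arr.append(["",i])
--     #for i in range(0,min_len):
--     #    if arr1[i][0] == arr2[i][0] and arr1[i][1] != arr2[i][1]:
--     #        arr.append([arr1[i],arr2[i]])
--     #if len(arr1)!=min_len:
--     #    for j in range(min_len,len(arr1)):
--     #        arr.append([arr1[j],""])
--     #else:
--     #    for j in range(min_len,len(arr2)):
--     #        arr.append(["",arr2[j]])
--     return arr
-- ===== SOURCE B (Python) =====
-- def generate_compare_array(arr1, arr2):
--     # Sort-based join: encode each arr2 position as key(j)*n + t (key-major, position-minor),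
--     # sort the encodings once, and answer each "first arr2 element with this first char"
--     # query by binary search; arr1-key membership for the second part is a binary search
--     # in the sorted key list.
--     def key(s):
--         return ord(s[0]) if s else -1
--
--     def bl(a, x):
--         # leftmost position p with a[p] >= x (standard bisect_left loop)
--         lo, hi = 0, len(a)
--         while lo < hi:
--             mid = (lo + hi) // 2
--             if a[mid] < x:
--                 lo = mid + 1
--             else:
--                 hi = mid
--         return lo
--
--     n = len(arr2)
--     e2 = sorted(key(j) * n + t for t, j in enumerate(arr2))
--     k1 = sorted(key(i) for i in arr1)
--     out = []
--     for i in arr1: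
--         p = bl(e2, key(i) * n)
--         if p < n and e2[p] // n == key(i):
--             j = arr2[e2[p] % n]
--             if i[1] != j[1]:
--                 out.append([i, j])
--         else:
--             out.append([i, ""])
--     for j in arr2:
--         p = bl(k1, key(j))
--         if p == len(k1) or k1[p] != key(j):
--             out.append(["", j])
--     return out
-- ===== Notes on version B (the rewrite author's own statement) =====
-- stated objective: alternative
-- what changed: replaces A's nested scans by a sort-based join: arr2's positions are encoded key-major/position-minor into integers and sorted once, each 'first arr2 element with this first char' query and each arr1-key membership test is answered by binary search
import Mathlib
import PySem

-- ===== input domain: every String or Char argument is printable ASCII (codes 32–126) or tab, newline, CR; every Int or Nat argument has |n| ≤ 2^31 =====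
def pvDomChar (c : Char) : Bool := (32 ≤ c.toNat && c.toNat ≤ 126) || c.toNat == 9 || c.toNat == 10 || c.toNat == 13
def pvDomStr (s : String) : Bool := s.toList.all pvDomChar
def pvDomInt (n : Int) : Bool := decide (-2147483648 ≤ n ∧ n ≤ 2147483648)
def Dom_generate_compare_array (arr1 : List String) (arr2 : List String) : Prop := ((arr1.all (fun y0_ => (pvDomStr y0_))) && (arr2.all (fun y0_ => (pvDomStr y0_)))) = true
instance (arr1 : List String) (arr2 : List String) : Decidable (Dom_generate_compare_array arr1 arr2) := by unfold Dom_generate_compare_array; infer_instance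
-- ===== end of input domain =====

-- B replaces A's nested scans by a sort-based join: arr2's positions are encoded key-major /
-- position-minor into integers, sorted once, and each "first arr2 element with this first
-- character" query is answered by binary search (objective: alternative).

-- s[0] and s[1] (none = IndexError on the Python side; Pre_ excludes exactly A's raising inputs)
def pvChr0 (s : String) : Option Char := PySem.Str.pyGet? s 0
def pvChr1 (s : String) : Option Char := PySem.Str.pyGet? s 1

-- ===== PORT A =====
-- inner loop over arr2 for one i of arr1: break with [i,j] (flag 1), break with nothing (flag 2),
-- or fall off the end (flag 0 → [i,""])
def pvScan1 (i : String) : List String → List (List String)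
  | [] => [[i, ""]]
  | j :: rest =>
      if pvChr0 i = pvChr0 j ∧ pvChr1 i ≠ pvChr1 j then [[i, j]]
      else if pvChr0 i = pvChr0 j ∧ pvChr1 i = pvChr1 j then []
      else pvScan1 i rest

-- inner loop over arr1 for one i of arr2
def pvScan2 (i : String) : List String → List (List String)
  | [] => [["", i]]
  | j :: rest => if pvChr0 i = pvChr0 j then [] else pvScan2 i rest

def generate_compare_array (arr1 : List String) (arr2 : List String) : List (List String) :=
  arr2.foldl (fun acc i => acc ++ pvScan2 i arr1)
    (arr1.foldl (fun acc i => acc ++ pvScan1 i arr2) [])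

-- ===== PORT B =====
-- key(s) = ord(s[0]) if s else -1
def pvKey (s : String) : Int :=
  match s.toList with
  | [] => -1
  | c :: _ => (c.toNat : Int)

-- e2 = sorted(key(j) * n + t for t, j in enumerate(arr2))
def pvE2 (arr2 : List String) : List Int :=
  PySem.List.sorted ((PySem.List.enumerate arr2).map
    (fun tj => pvKey tj.2 * (arr2.length : Int) + tj.1)) (fun x => x)

-- k1 = sorted(key(i) for i in arr1)
def pvK1 (arr1 : List String) : List Int :=
  PySem.List.sorted (arr1.map pvKey) (fun x => x)

-- bl(a, x): B's hand-written loop is the standard bisect_left loop, which is step for step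
-- PySem.List.bisectLeft (same lo/hi halving, same comparison, same floor midpoint).
-- body of B's first for-loop (the chunk appended for one i of arr1); e2[p] and arr2[e2[p] % n]
-- are ported with getD / pyGetD, exact because the guard keeps both indices in range.
def pvBody1 (arr2 : List String) (i : String) : List (List String) :=
  let p := PySem.List.bisectLeft (pvE2 arr2) (pvKey i * (arr2.length : Int))
  if p < arr2.length ∧ PySem.Int.floordiv ((pvE2 arr2).getD p 0) (arr2.length : Int) = pvKey i then
    let j := PySem.List.pyGetD arr2 (PySem.Int.mod ((pvE2 arr2).getD p 0) (arr2.length : Int)) ""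
    if pvChr1 i ≠ pvChr1 j then [[i, j]] else []
  else [[i, ""]]

-- body of B's second for-loop (the chunk appended for one j of arr2)
def pvBody2 (arr1 : List String) (j : String) : List (List String) :=
  let p := PySem.List.bisectLeft (pvK1 arr1) (pvKey j)
  if p = (pvK1 arr1).length ∨ (pvK1 arr1).getD p 0 ≠ pvKey j then [["", j]] else []

def generate_compare_array_alt (arr1 : List String) (arr2 : List String) : List (List String) :=
  arr2.foldl (fun acc j => acc ++ pvBody2 arr1 j)
    (arr1.foldl (fun acc i => acc ++ pvBody1 arr2 i) [])

-- ===== PRECONDITION & SPEC =====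
-- A raises IndexError for i of arr1 exactly when arr2 is nonempty and i is empty, or the first
-- j of arr2 that is empty or first-char-matches i is empty or leaves i[1]/j[1] out of range.
def pvBad1 (i : String) (arr2 : List String) : Bool :=
  arr2 ≠ [] && (i = "" ||
    match arr2.find? (fun j => j == "" || pvChr0 j == pvChr0 i) with
    | some j => j == "" || PySem.Str.len i < 2 || PySem.Str.len j < 2
    | none => false)

-- A raises IndexError for i of arr2 exactly when arr1 is nonempty and i is empty, or the first
-- j of arr1 that is empty or first-char-matches i is empty.
def pvBad2 (i : String) (arr1 : List String) : Bool :=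
  arr1 ≠ [] && (i = "" ||
    match arr1.find? (fun j => j == "" || pvChr0 j == pvChr0 i) with
    | some j => j == ""
    | none => false)

-- Pre_ excludes exactly the inputs on which the Python A raises IndexError (and nothing else):
-- an empty string reached by a scan, or a first-char match whose witness has no second character.
def Pre_generate_compare_array (arr1 : List String) (arr2 : List String) : Prop :=
  (∀ i ∈ arr1, pvBad1 i arr2 = false) ∧ (∀ i ∈ arr2, pvBad2 i arr1 = false)
instance (arr1 : List String) (arr2 : List String) : Decidable (Pre_generate_compare_array arr1 arr2) := by unfold Pre_generate_compare_array; infer_instance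

def pvWitness_generate_compare_array : List String × List String := (["ab", "xy"], ["ac", "zz"])

def Spec_generate_compare_array (arr1 : List String) (arr2 : List String) (out : List (List String)) : Prop := out = generate_compare_array_alt arr1 arr2
instance (arr1 : List String) (arr2 : List String) (out : List (List String)) : Decidable (Spec_generate_compare_array arr1 arr2 out) := by unfold Spec_generate_compare_array; infer_instance

-- ===== CLAIM (what is proved, stated in full; the proofs are below) =====
def Claim_equal_generate_compare_array : Prop := ∀ (arr1 : List String) (arr2 : List String), Dom_generate_compare_array arr1 arr2 → Pre_generate_compare_array arr1 arr2 → Spec_generate_compare_array arr1 arr2 (generate_compare_array arr1 arr2)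

-- ===== LEMMAS AND PROOFS =====

-- ---- bridges between A's character view and B's integer-key view ----

theorem chr0_eq_head (s : String) : pvChr0 s = s.toList.head? := by
  unfold pvChr0
  cases h : s.toList <;>
    simp [PySem.Str.pyGet?, PySem.Chars.pyGet?, PySem.List.pyGet?, h, PySem.List.pyIdx?]

theorem char_toNat_inj (c d : Char) (h : c.toNat = d.toNat) : c = d := by
  have := congrArg Char.ofNat h
  simpa [Char.ofNat_toNat] using this

theorem keyEq (i j : String) : (pvKey j = pvKey i) ↔ (pvChr0 j = pvChr0 i) := by
  rw [chr0_eq_head, chr0_eq_head]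
  unfold pvKey
  cases hi : i.toList <;> cases hj : j.toList <;> simp <;> try omega
  exact ⟨fun h => char_toNat_inj _ _ (by exact_mod_cast h), fun h => by rw [h]⟩

theorem pred_bridge (i : String) :
    (fun j => pvChr0 j == pvChr0 i) = (fun j => pvKey j == pvKey i) := by
  funext j
  by_cases h : pvChr0 j = pvChr0 i
  · simp [h, (keyEq i j).mpr h]
  · have hk : ¬ pvKey j = pvKey i := fun hk => h ((keyEq i j).mp hk)
    simp [h, hk]

-- ---- the encoded, sorted arr2 positions ----

def pvEnc (arr2 : List String) (t : Nat) : Int :=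
  pvKey (arr2.getD t "") * (arr2.length : Int) + t

theorem e2_eq_sorted_range (arr2 : List String) :
    pvE2 arr2 = PySem.List.sorted ((List.range arr2.length).map (pvEnc arr2)) (fun x => x) := by
  unfold pvE2
  congr 1
  rw [PySem.List.enumerate_eq_zipIdx_map]
  apply List.ext_getElem
  · simp
  · intro t h1 h2
    simp only [List.length_map, List.length_zipIdx] at h1
    simp only [List.getElem_map, List.getElem_zipIdx, List.getElem_range]
    unfold pvEnc
    rw [List.getD_eq_getElem _ _ h1]
    push_cast
    try ring

theorem e2_perm (arr2 : List String) :
    (pvE2 arr2).Perm ((List.range arr2.length).map (pvEnc arr2)) := by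
  rw [e2_eq_sorted_range]; exact PySem.List.sorted_perm _ _ _

theorem e2_length (arr2 : List String) : (pvE2 arr2).length = arr2.length := by
  simpa using (e2_perm arr2).length_eq

theorem e2_mem (arr2 : List String) (x : Int) :
    x ∈ pvE2 arr2 ↔ ∃ t, t < arr2.length ∧ pvEnc arr2 t = x := by
  rw [(e2_perm arr2).mem_iff]
  simp [List.mem_map, List.mem_range, eq_comm]

theorem e2_pairwise (arr2 : List String) : List.Pairwise (· ≤ ·) (pvE2 arr2) := by
  unfold pvE2
  simpa using PySem.List.sorted_pairwise
    ((PySem.List.enumerate arr2).map (fun tj => pvKey tj.2 * (arr2.length : Int) + tj.1))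
    (fun x => x)

theorem e2_mono (arr2 : List String) {p q : Nat} (hpq : p ≤ q) (hq : q < (pvE2 arr2).length) :
    (pvE2 arr2)[p]'(lt_of_le_of_lt hpq hq) ≤ (pvE2 arr2)[q] := by
  unfold pvE2 at *
  exact PySem.List.sorted_id_getElem_mono _ hpq hq

-- decoding the key-major / position-minor encoding
theorem enc_decode (a t N : Int) (hN : 0 < N) (ht0 : 0 ≤ t) (htN : t < N) :
    PySem.Int.floordiv (a * N + t) N = a ∧ PySem.Int.mod (a * N + t) N = t := by
  have hfd : PySem.Int.floordiv (a * N + t) N = a := by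
    rw [PySem.Int.floordiv_eq_iff_of_pos hN]
    constructor
    · linarith
    · nlinarith
  refine ⟨hfd, ?_⟩
  have := PySem.Int.floordiv_mul_add_mod (a * N + t) N
  rw [hfd] at this
  linarith

theorem key_unique (a k t N : Int) (hN : 0 < N) (ht0 : 0 ≤ t) (htN : t < N)
    (h1 : k * N ≤ a * N + t) (h2 : a * N + t < (k + 1) * N) : a = k := by
  have hak : a ≤ k := by nlinarith
  have hka : k ≤ a := by nlinarith
  omega

-- ---- the two binary-search lookups ----

-- successful lookup: some position of arr2 has key k; then the guard holds and the decoded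
-- position is the least position of arr2 with key k
theorem lookup_pos (arr2 : List String) (k : Int)
    (h : ∃ t, t < arr2.length ∧ pvKey (arr2.getD t "") = k) :
    PySem.List.bisectLeft (pvE2 arr2) (k * (arr2.length : Int)) < arr2.length ∧
    PySem.Int.floordiv ((pvE2 arr2).getD (PySem.List.bisectLeft (pvE2 arr2) (k * (arr2.length : Int))) 0) (arr2.length : Int) = k ∧
    0 ≤ PySem.Int.mod ((pvE2 arr2).getD (PySem.List.bisectLeft (pvE2 arr2) (k * (arr2.length : Int))) 0) (arr2.length : Int) ∧
    (PySem.Int.mod ((pvE2 arr2).getD (PySem.List.bisectLeft (pvE2 arr2) (k * (arr2.length : Int))) 0) (arr2.length : Int)).toNat < arr2.length ∧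
    pvKey (arr2.getD (PySem.Int.mod ((pvE2 arr2).getD (PySem.List.bisectLeft (pvE2 arr2) (k * (arr2.length : Int))) 0) (arr2.length : Int)).toNat "") = k ∧
    ∀ t, t < (PySem.Int.mod ((pvE2 arr2).getD (PySem.List.bisectLeft (pvE2 arr2) (k * (arr2.length : Int))) 0) (arr2.length : Int)).toNat →
      pvKey (arr2.getD t "") ≠ k := by
  obtain ⟨t, htn, htk⟩ := h
  have hn : 0 < arr2.length := lt_of_le_of_lt (Nat.zero_le t) htn
  have hnI : (0 : Int) < (arr2.length : Int) := by exact_mod_cast hn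
  have hlen : (pvE2 arr2).length = arr2.length := e2_length arr2
  obtain ⟨hple, hlt, hge⟩ :=
    PySem.List.bisectLeft_spec (pvE2 arr2) (k * (arr2.length : Int)) (e2_pairwise arr2)
  set e2 := pvE2 arr2 with he2
  set p := PySem.List.bisectLeft e2 (k * (arr2.length : Int)) with hp
  -- the encoding of t is in e2, above the threshold
  have htmem : pvEnc arr2 t ∈ e2 := (e2_mem arr2 _).mpr ⟨t, htn, rfl⟩
  obtain ⟨q, hq, hqe⟩ := List.mem_iff_getElem.mp htmem
  have henc_t : pvEnc arr2 t = k * (arr2.length : Int) + t := by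
    unfold pvEnc; rw [htk]
  have htge : k * (arr2.length : Int) ≤ pvEnc arr2 t := by
    rw [henc_t]; have : (0:Int) ≤ t := by exact_mod_cast Nat.zero_le t
    linarith
  have hpq : p ≤ q := by
    by_contra hc
    exact absurd (hqe ▸ hlt q hq (by omega)) (not_lt.mpr htge)
  have hplt : p < arr2.length := by omega
  have hplen : p < e2.length := by omega
  have hgetD : e2.getD p 0 = e2[p] := List.getD_eq_getElem _ _ hplen
  -- e2[p] is itself an encoding of some position t'
  obtain ⟨t', ht'n, ht'e⟩ := (e2_mem arr2 _).mp (e2.getElem_mem hplen)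
  have ht'0 : (0:Int) ≤ (t' : Int) := by exact_mod_cast Nat.zero_le t'
  have ht'N : ((t' : Int)) < (arr2.length : Int) := by exact_mod_cast ht'n
  have htN : ((t : Int)) < (arr2.length : Int) := by exact_mod_cast htn
  have hp_ge : k * (arr2.length : Int) ≤ e2[p] := hge p hplen (le_refl p)
  have hp_le : e2[p] ≤ pvEnc arr2 t := by
    rw [← hqe]; exact e2_mono arr2 hpq (by omega)
  have hp_lt : e2[p] < (k + 1) * (arr2.length : Int) := by
    have : pvEnc arr2 t < (k + 1) * (arr2.length : Int) := by rw [henc_t]; nlinarith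
    linarith
  -- decode e2[p]
  have hkey' : pvKey (arr2.getD t' "") = k := by
    apply key_unique (pvKey (arr2.getD t' "")) k (t' : Int) (arr2.length : Int) hnI ht'0 ht'N
    · rw [← pvEnc, ht'e]; exact hp_ge
    · rw [← pvEnc, ht'e]; exact hp_lt
  have henc' : e2[p] = k * (arr2.length : Int) + (t' : Int) := by
    rw [← ht'e]; unfold pvEnc; rw [hkey']
  obtain ⟨hfd, hmd⟩ := enc_decode k (t' : Int) (arr2.length : Int) hnI ht'0 ht'N
  have hfd' : PySem.Int.floordiv (e2.getD p 0) (arr2.length : Int) = k := by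
    rw [hgetD, henc']; exact hfd
  have hmd' : PySem.Int.mod (e2.getD p 0) (arr2.length : Int) = (t' : Int) := by
    rw [hgetD, henc']; exact hmd
  have htoNat : (PySem.Int.mod (e2.getD p 0) (arr2.length : Int)).toNat = t' := by
    rw [hmd']; exact Int.toNat_natCast t'
  refine ⟨hplt, hfd', by rw [hmd']; exact ht'0, by rw [htoNat]; exact ht'n,
    by rw [htoNat]; exact hkey', ?_⟩
  -- minimality
  intro s hs hsk
  rw [htoNat] at hs
  have hsn : s < arr2.length := by omega
  have hencs : pvEnc arr2 s = k * (arr2.length : Int) + (s : Int) := by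
    unfold pvEnc; rw [hsk]
  have hsmem : pvEnc arr2 s ∈ e2 := (e2_mem arr2 _).mpr ⟨s, hsn, rfl⟩
  obtain ⟨q2, hq2, hq2e⟩ := List.mem_iff_getElem.mp hsmem
  have hsge : k * (arr2.length : Int) ≤ pvEnc arr2 s := by
    have : (0:Int) ≤ (s : Int) := by exact_mod_cast Nat.zero_le s
    rw [hencs]; linarith
  have hpq2 : p ≤ q2 := by
    by_contra hc
    exact absurd (hq2e ▸ hlt q2 hq2 (by omega)) (not_lt.mpr hsge)
  have : e2[p] ≤ pvEnc arr2 s := by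
    rw [← hq2e]; exact e2_mono arr2 hpq2 (by omega)
  have hslt : pvEnc arr2 s < e2[p] := by
    rw [hencs, henc']
    have : ((s : Int)) < (t' : Int) := by exact_mod_cast hs
    linarith
  linarith

-- failed lookup: no position of arr2 has key k; then the guard fails
theorem lookup_neg (arr2 : List String) (k : Int)
    (h : ∀ t, t < arr2.length → pvKey (arr2.getD t "") ≠ k) :
    ¬ (PySem.List.bisectLeft (pvE2 arr2) (k * (arr2.length : Int)) < arr2.length ∧
       PySem.Int.floordiv ((pvE2 arr2).getD
         (PySem.List.bisectLeft (pvE2 arr2) (k * (arr2.length : Int))) 0) (arr2.length : Int) = k) := by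
  rintro ⟨hp, hfd⟩
  have hn : 0 < arr2.length := lt_of_le_of_lt (Nat.zero_le _) hp
  have hnI : (0 : Int) < (arr2.length : Int) := by exact_mod_cast hn
  have hlen : (pvE2 arr2).length = arr2.length := e2_length arr2
  set e2 := pvE2 arr2 with he2
  set p := PySem.List.bisectLeft e2 (k * (arr2.length : Int)) with hpdef
  have hplen : p < e2.length := by omega
  have hgetD : e2.getD p 0 = e2[p] := List.getD_eq_getElem _ _ hplen
  obtain ⟨t', ht'n, ht'e⟩ := (e2_mem arr2 _).mp (e2.getElem_mem hplen)
  have ht'0 : (0:Int) ≤ (t' : Int) := by exact_mod_cast Nat.zero_le t'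
  have ht'N : ((t' : Int)) < (arr2.length : Int) := by exact_mod_cast ht'n
  obtain ⟨hfd2, _⟩ :=
    enc_decode (pvKey (arr2.getD t' "")) (t' : Int) (arr2.length : Int) hnI ht'0 ht'N
  have : pvKey (arr2.getD t' "") = k := by
    rw [← hfd2]
    rw [hgetD, ← ht'e] at hfd
    unfold pvEnc at hfd
    exact hfd.symm ▸ rfl
  exact h t' ht'n this

theorem k1_mono (arr1 : List String) {p q : Nat} (hpq : p ≤ q) (hq : q < (pvK1 arr1).length) :
    (pvK1 arr1)[p]'(lt_of_le_of_lt hpq hq) ≤ (pvK1 arr1)[q] := by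
  unfold pvK1 at *
  exact PySem.List.sorted_id_getElem_mono _ hpq hq

-- membership test in the sorted key list of arr1
theorem k1_mem (arr1 : List String) (k : Int) :
    (PySem.List.bisectLeft (pvK1 arr1) k = (pvK1 arr1).length ∨
      (pvK1 arr1).getD (PySem.List.bisectLeft (pvK1 arr1) k) 0 ≠ k) ↔
    ¬ ∃ i ∈ arr1, pvKey i = k := by
  have hperm : (pvK1 arr1).Perm (arr1.map pvKey) := PySem.List.sorted_perm _ _ _
  have hpw : List.Pairwise (· ≤ ·) (pvK1 arr1) := by
    unfold pvK1
    simpa using PySem.List.sorted_pairwise (arr1.map pvKey) (fun x => x)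
  obtain ⟨hple, hlt, hge⟩ := PySem.List.bisectLeft_spec (pvK1 arr1) k hpw
  set l := pvK1 arr1 with hl
  set p := PySem.List.bisectLeft l k with hpdef
  have main : (p ≠ l.length ∧ l.getD p 0 = k) ↔ ∃ i ∈ arr1, pvKey i = k := by
    constructor
    · rintro ⟨hne, hdk⟩
      have hplen : p < l.length := lt_of_le_of_ne hple hne
      have : l[p] ∈ l := l.getElem_mem hplen
      have hmem : l[p] ∈ arr1.map pvKey := hperm.mem_iff.mp this
      rw [← List.getD_eq_getElem _ _ hplen, hdk] at hmem
      obtain ⟨i, hi, hik⟩ := List.mem_map.mp hmem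
      exact ⟨i, hi, hik⟩
    · rintro ⟨i, hi, hik⟩
      have hmem : k ∈ l := hperm.mem_iff.mpr (List.mem_map.mpr ⟨i, hi, hik⟩)
      obtain ⟨q, hq, hqe⟩ := List.mem_iff_getElem.mp hmem
      have hpq : p ≤ q := by
        by_contra hc
        exact absurd (hqe ▸ hlt q hq (by omega)) (by simp)
      have hplen : p < l.length := by omega
      have h1 : k ≤ l[p] := hge p hplen (le_refl p)
      have h2 : l[p] ≤ l[q] := k1_mono arr1 hpq hq
      rw [hqe] at h2
      refine ⟨by omega, ?_⟩
      rw [List.getD_eq_getElem _ _ hplen]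
      omega
  constructor
  · intro hc hex
    obtain ⟨hne, hdk⟩ := main.mpr hex
    rcases hc with h | h
    · exact hne h
    · exact h hdk
  · intro hne
    by_contra hc
    push_neg at hc
    exact hne (main.mp ⟨hc.1, hc.2⟩)

-- ---- find? as least matching position ----

theorem find?_of_least {α : Type} (P : α → Bool) (l : List α) (t0 : Nat) (h0 : t0 < l.length)
    (hP : P (l[t0]) = true) (hmin : ∀ t, (ht : t < t0) → P (l[t]'(lt_trans ht h0)) = false) :
    l.find? P = some l[t0] := by
  induction l generalizing t0 with
  | nil => simp at h0
  | cons x xs ih =>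
      cases t0 with
      | zero =>
          have hx : P x = true := by simpa using hP
          simp [List.find?, hx]
      | succ t =>
          have hx : P x = false := hmin 0 (Nat.succ_pos t)
          simp only [List.find?, hx]
          exact ih t (by simpa using h0) (by simpa using hP)
            (fun s hs => hmin (s + 1) (by omega))

-- ---- A's two inner loops, characterised ----

theorem pvScan1_eq_find (i : String) (l : List String) :
    pvScan1 i l = match l.find? (fun j => pvChr0 j == pvChr0 i) with
      | none => [[i, ""]]
      | some j => if pvChr1 i ≠ pvChr1 j then [[i, j]] else [] := by
  induction l with
  | nil => rfl
  | cons j rest ih =>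
      by_cases h0 : pvChr0 i = pvChr0 j
      · by_cases h1 : pvChr1 i = pvChr1 j <;>
          simp [pvScan1, List.find?, h0, h1]
      · have : (pvChr0 j == pvChr0 i) = false := by
          simp; exact fun h => h0 h.symm
        simp [pvScan1, List.find?, h0, this, ih]

theorem pvScan2_eq_any (i : String) (l : List String) :
    pvScan2 i l = if l.any (fun j => pvChr0 i == pvChr0 j) then [] else [["", i]] := by
  induction l with
  | nil => rfl
  | cons j rest ih =>
      by_cases h : pvChr0 i = pvChr0 j <;> simp [pvScan2, h, ih]

-- ---- per-element agreement of the two programs (unconditional on the ports) ----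

theorem body1_eq_scan1 (arr2 : List String) (i : String) :
    pvBody1 arr2 i = pvScan1 i arr2 := by
  rw [pvScan1_eq_find i arr2, pred_bridge i]
  unfold pvBody1
  by_cases hex : ∃ t, t < arr2.length ∧ pvKey (arr2.getD t "") = pvKey i
  · obtain ⟨hp, hfd, hm0, htn, htk, hmin⟩ := lookup_pos arr2 (pvKey i) hex
    set p := PySem.List.bisectLeft (pvE2 arr2) (pvKey i * (arr2.length : Int)) with hpdef
    set t0 := (PySem.Int.mod ((pvE2 arr2).getD p 0) (arr2.length : Int)).toNat with ht0def
    have hfind : arr2.find? (fun j => pvKey j == pvKey i) = some (arr2[t0]'htn) := by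
      apply find?_of_least _ _ t0 htn
      · have h' := htk
        rw [List.getD_eq_getElem arr2 "" htn] at h'
        simp [h']
      · intro t ht
        have hne := hmin t ht
        rw [List.getD_eq_getElem arr2 "" (lt_trans ht htn)] at hne
        simp [hne]
    rw [if_pos ⟨hp, hfd⟩, hfind]
    have hj : PySem.List.pyGetD arr2 (PySem.Int.mod ((pvE2 arr2).getD p 0) (arr2.length : Int)) ""
        = arr2[t0]'htn := by
      rw [PySem.List.pyGetD_of_nonneg arr2 "" hm0]
      exact List.getD_eq_getElem _ _ htn
    rw [hj]
  · push_neg at hex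
    rw [if_neg (lookup_neg arr2 (pvKey i) hex)]
    have hfind : arr2.find? (fun j => pvKey j == pvKey i) = none := by
      rw [List.find?_eq_none]
      intro x hx
      obtain ⟨t, htl, hte⟩ := List.mem_iff_getElem.mp hx
      have := hex t htl
      rw [List.getD_eq_getElem arr2 "" htl, hte] at this
      simp [this]
    rw [hfind]

theorem body2_eq_scan2 (arr1 : List String) (j : String) :
    pvBody2 arr1 j = pvScan2 j arr1 := by
  rw [pvScan2_eq_any]
  unfold pvBody2
  by_cases hex : ∃ x ∈ arr1, pvKey x = pvKey j
  · rw [if_neg (fun h => ((k1_mem arr1 (pvKey j)).mp h) hex)]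
    have hany : arr1.any (fun x => pvChr0 j == pvChr0 x) = true := by
      obtain ⟨x, hx, hk⟩ := hex
      exact List.any_eq_true.mpr ⟨x, hx, by simp [((keyEq j x).mp hk).symm]⟩
    simp [hany]
  · rw [if_pos ((k1_mem arr1 (pvKey j)).mpr hex)]
    have hany : arr1.any (fun x => pvChr0 j == pvChr0 x) = false := by
      rw [List.any_eq_false]
      intro x hx
      simp only [beq_iff_eq]
      exact fun hc => hex ⟨x, hx, (keyEq j x).mpr hc.symm⟩
    simp [hany]

theorem ports_eq (arr1 arr2 : List String) :
    generate_compare_array arr1 arr2 = generate_compare_array_alt arr1 arr2 := by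
  unfold generate_compare_array generate_compare_array_alt
  rw [PySem.List.foldl_congr_mem arr1 (fun acc i => acc ++ pvScan1 i arr2)
        (fun acc i => acc ++ pvBody1 arr2 i) []
        (fun acc i _ => by simp only [body1_eq_scan1]),
      PySem.List.foldl_congr_mem arr2 (fun acc i => acc ++ pvScan2 i arr1)
        (fun acc j => acc ++ pvBody2 arr1 j) _
        (fun acc j _ => by simp only [body2_eq_scan2])]

-- ===== VERDICT =====
theorem generate_compare_array_spec : Claim_equal_generate_compare_array := by
  intro arr1 arr2 _ _
  unfold Spec_generate_compare_array
  exact ports_eq arr1 arr2
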